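-- pv_equiv track=rewrite | github.com/EmadEJ/MIR-imdb | Logic/core/search.py | merge_scores
-- ===== SOURCE A (Python) =====
-- def merge_scores(scores1, scores2):
--     """
--     Merges two dictionaries of scores.
--
--     Parameters
--     ----------
--     scores1 : dict
--         The first dictionary of scores.
--     scores2 : dict
--         The second dictionary of scores.
--
--     Returns
--     -------
--     dict
--         The merged dictionary of scores.
--     """
--
--     final_scores = {}
--     for doc in scores1:
--         if final_scores.get(doc) is None:
--             final_scores[doc] = 0
--         final_scores[doc] += scores1[doc]
--     for doc in scores2:
--         if final_scores.get(doc) is None: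
--             final_scores[doc] = 0
--         final_scores[doc] += scores2[doc]
--     return final_scores
-- ===== SOURCE B (Python) =====
-- def merge_scores(scores1, scores2):
--     keys = dict.fromkeys(list(scores1) + list(scores2))
--     return {doc: scores1.get(doc, 0) + scores2.get(doc, 0) for doc in keys}
-- ===== Notes on version B (the rewrite author's own statement) =====
-- stated objective: simpler
-- what changed: Replaces A's two accumulating loops with their initialize-if-missing branches by computing the ordered union of keys once (dict.fromkeys) and building the result in a single direct comprehension k -> scores1.get(k,0)+scores2.get(k,0).
import Mathlib
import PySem

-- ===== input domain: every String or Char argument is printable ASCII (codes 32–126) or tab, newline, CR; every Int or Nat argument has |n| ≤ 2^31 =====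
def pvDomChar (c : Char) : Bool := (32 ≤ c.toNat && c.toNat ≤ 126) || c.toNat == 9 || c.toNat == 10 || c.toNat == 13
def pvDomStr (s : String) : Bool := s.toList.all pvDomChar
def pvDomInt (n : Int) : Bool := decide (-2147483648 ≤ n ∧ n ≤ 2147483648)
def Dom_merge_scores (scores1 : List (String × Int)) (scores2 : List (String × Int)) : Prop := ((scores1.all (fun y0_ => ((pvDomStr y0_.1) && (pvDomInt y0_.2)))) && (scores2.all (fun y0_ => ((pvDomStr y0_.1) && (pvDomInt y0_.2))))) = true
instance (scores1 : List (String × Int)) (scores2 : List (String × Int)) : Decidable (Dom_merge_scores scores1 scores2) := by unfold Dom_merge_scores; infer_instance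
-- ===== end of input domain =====

-- B replaces A's two accumulating loops (with initialize-if-missing branches) by one pass over the
-- ordered union of keys, computing each sum directly; objective: simpler.

-- ===== PORT A =====
-- one iteration of A's loops: 'if final_scores.get(doc) is None: final_scores[doc] = 0; final_scores[doc] += <value>'
-- (iterating a Python dict yields each entry's key; the entry's value is p.2)
def mergeStep (d : PySem.Dict String Int) (p : String × Int) : PySem.Dict String Int :=
  let d' := if d.get? p.1 = none then d.insert p.1 0 else d
  d'.insert p.1 (d'.getD p.1 0 + p.2)

def merge_scores (scores1 : List (String × Int)) (scores2 : List (String × Int)) : List (String × Int) :=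
  (scores2.foldl mergeStep (scores1.foldl mergeStep PySem.Dict.empty)).items

-- ===== PORT B =====
def merge_scores_alt (scores1 : List (String × Int)) (scores2 : List (String × Int)) : List (String × Int) :=
  let keys := PySem.List.dedup (scores1.map (fun p => p.1) ++ scores2.map (fun p => p.1))
  keys.map (fun k => (k, (PySem.Dict.mk scores1).getD k 0 + (PySem.Dict.mk scores2).getD k 0))

-- ===== PRECONDITION & SPEC =====
-- The arguments encode Python dicts, whose keys are necessarily distinct; Pre_ states exactly that
-- dict invariant (a list with a repeated key is not a value A's Python can receive).
def Pre_merge_scores (scores1 : List (String × Int)) (scores2 : List (String × Int)) : Prop :=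
  (scores1.map (fun p => p.1)).Nodup ∧ (scores2.map (fun p => p.1)).Nodup
instance (scores1 : List (String × Int)) (scores2 : List (String × Int)) : Decidable (Pre_merge_scores scores1 scores2) := by unfold Pre_merge_scores; infer_instance

def pvWitness_merge_scores : (List (String × Int)) × (List (String × Int)) :=
  ([("a", 1), ("c", -2)], [("a", 4), ("b", 3)])

def Spec_merge_scores (scores1 : List (String × Int)) (scores2 : List (String × Int)) (out : List (String × Int)) : Prop := out = merge_scores_alt scores1 scores2
instance (scores1 : List (String × Int)) (scores2 : List (String × Int)) (out : List (String × Int)) : Decidable (Spec_merge_scores scores1 scores2 out) := by unfold Spec_merge_scores; infer_instance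

-- ===== CLAIM (what is proved, stated in full; the proofs are below) =====
def Claim_equal_merge_scores : Prop := ∀ (scores1 : List (String × Int)) (scores2 : List (String × Int)), Dom_merge_scores scores1 scores2 → Pre_merge_scores scores1 scores2 → Spec_merge_scores scores1 scores2 (merge_scores scores1 scores2)

-- ===== LEMMAS AND PROOFS =====

-- A's loop body is a single insert of the updated sum
theorem mergeStep_eq (d : PySem.Dict String Int) (p : String × Int) :
    mergeStep d p = d.insert p.1 (d.getD p.1 0 + p.2) := by
  unfold mergeStep
  by_cases h : d.get? p.1 = none
  · simp [h, PySem.Dict.insert_insert_self, PySem.Dict.getD_insert_self,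
      PySem.Dict.getD_of_get?_eq_none _ _ h]
  · simp [h]

-- running-sum value of A's fold at any key
theorem getD_foldl_merge (l : List (String × Int)) (d : PySem.Dict String Int) (k : String) :
    (l.foldl (fun d p => d.insert p.1 (d.getD p.1 0 + p.2)) d).getD k 0
      = d.getD k 0 + ((l.filter (fun p => p.1 == k)).map (fun p => p.2)).sum := by
  induction l generalizing d with
  | nil => simp
  | cons p t ih =>
    simp only [List.foldl_cons, ih, List.filter_cons]
    by_cases h : p.1 = k
    · simp [h, PySem.Dict.getD_insert_self]; ring
    · simp only [PySem.Dict.getD_insert]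
      rw [if_neg (fun hh => h hh.symm)]
      simp [h]

-- under the dict invariant, first-match lookup is the filter-sum
theorem getD_mk_eq_filter_sum (s : List (String × Int)) (k : String)
    (h : (s.map (fun p => p.1)).Nodup) :
    (PySem.Dict.mk s).getD k 0 = ((s.filter (fun p => p.1 == k)).map (fun p => p.2)).sum := by
  induction s with
  | nil => simp [PySem.Dict.getD_eq_get?_getD, PySem.Dict.get?]
  | cons p t ih =>
    obtain ⟨a, v⟩ := p
    simp only [List.map_cons, List.nodup_cons] at h
    simp only [List.filter_cons, PySem.Dict.getD_eq_get?_getD, PySem.Dict.get?_mk_cons]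
    by_cases hk : a = k
    · have ht : t.filter (fun q => q.1 == k) = [] := by
        rw [List.filter_eq_nil_iff]
        intro q hq hkq
        exact h.1 (hk ▸ (by simpa using hkq) ▸ List.mem_map_of_mem hq)
      simp [hk, ht]
    · simpa [hk, PySem.Dict.getD_eq_get?_getD] using ih h.2

-- ===== VERDICT (by name: the statement is the Claim_ definition above) =====
theorem merge_scores_spec : Claim_equal_merge_scores := by
  intro s1 s2 _ hpre
  show merge_scores s1 s2 = merge_scores_alt s1 s2
  unfold merge_scores merge_scores_alt
  have hstep : mergeStep = fun d (p : String × Int) => d.insert p.1 (d.getD p.1 0 + p.2) :=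
    funext fun d => funext fun p => mergeStep_eq d p
  rw [hstep]
  -- keys of the folded dict are unique and come in first-insertion order of s1 ++ s2
  have hnd : ((s2.foldl (fun d p => d.insert p.1 (d.getD p.1 0 + p.2))
      (s1.foldl (fun d p => d.insert p.1 (d.getD p.1 0 + p.2)) PySem.Dict.empty)).keys).Nodup := by
    apply PySem.Dict.nodup_keys_foldl_insert_key s2 (fun p => p.1) (fun d p => d.getD p.1 0 + p.2)
    apply PySem.Dict.nodup_keys_foldl_insert_key s1 (fun p => p.1) (fun d p => d.getD p.1 0 + p.2)
    simp
  rw [PySem.Dict.items_eq_map_keys _ hnd 0]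
  have hkeys : (s2.foldl (fun d p => d.insert p.1 (d.getD p.1 0 + p.2))
      (s1.foldl (fun d p => d.insert p.1 (d.getD p.1 0 + p.2)) PySem.Dict.empty)).keys
      = PySem.List.dedup (s1.map (fun p => p.1) ++ s2.map (fun p => p.1)) := by
    rw [PySem.Dict.keys_foldl_insert_key s2 (fun p => p.1) (fun d p => d.getD p.1 0 + p.2),
        PySem.Dict.keys_foldl_insert_key s1 (fun p => p.1) (fun d p => d.getD p.1 0 + p.2)]
    show PySem.Set.update (PySem.Set.update PySem.Dict.empty.keys _) _ = _
    simp only [PySem.Dict.keys_empty]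
    show List.foldl PySem.Set.add (List.foldl PySem.Set.add [] (s1.map (fun p => p.1)))
        (s2.map (fun p => p.1)) = _
    rw [← List.foldl_append]
    rfl
  rw [hkeys]
  apply List.map_congr_left
  intro k _
  rw [getD_foldl_merge, getD_foldl_merge,
      getD_mk_eq_filter_sum s1 k hpre.1, getD_mk_eq_filter_sum s2 k hpre.2]
  simp
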